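-- pv_equiv track=rewrite | github.com/manirupa/seq2set-semantic-tagging | preprocess/make_phrases.py | embed_phrases
-- ===== SOURCE A (Python) =====
-- def embed_phrases(line, phrase_list):
--     if not line or not phrase_list:
--         return line
--
--     token_list = line.split()
--
--     token_count = len(token_list)
--     phrase_count = len(phrase_list)
--
--     cur_phrase = 0
--     cur_token = 0
--
--     embedded_tokens = []
--
--     while cur_token < token_count:
--         if cur_phrase == phrase_count:
--             embedded_tokens.extend(token_list[cur_token:])
--             break
--         phrase = phrase_list[cur_phrase].split()
--         cur_phrase_len = len(phrase)
--
--         # matching all tokens of a phrase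
--         if token_list[cur_token: cur_token + cur_phrase_len] == phrase:
--             embedded_tokens.append('_'.join(phrase))
--             # advance token counter by length of phrase
--             cur_token += cur_phrase_len
--             cur_phrase += 1
--         else:
--             embedded_tokens.append(token_list[cur_token])
--             cur_token += 1
--     return ' '.join(embedded_tokens)
-- ===== SOURCE B (Python) =====
-- def embed_phrases(line, phrase_list):
--     if not line or not phrase_list:
--         return line
--     tokens = line.split()
--     n = len(tokens)
--     # Pass 1: locate each phrase's first match at or after the running cursor,
--     # recording (start, end, joined) spans; stop when a phrase has no match.
--     spans = []
--     cur = 0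
--     for p in phrase_list:
--         ph = p.split()
--         start = next((i for i in range(cur, n)
--                       if tokens[i:i + len(ph)] == ph), None)
--         if start is None:
--             break
--         spans.append((start, start + len(ph), '_'.join(ph)))
--         cur = start + len(ph)
--     # Pass 2: stitch plain token runs and embedded phrases from the span table.
--     pieces = []
--     prev = 0
--     for start, end, joined in spans:
--         pieces.extend(tokens[prev:start])
--         pieces.append(joined)
--         prev = end
--     pieces.extend(tokens[prev:])
--     return ' '.join(pieces)
-- ===== Notes on version B (the rewrite author's own statement) =====
-- stated objective: alternative
-- what changed: Replaced A's single interleaved scan-and-emit while-loop by two staged passes: a first pass that searches out and records the (start, end, joined) span of each phrase's first match after the running cursor, and a second pass that assembles the output from the token runs between the recorded spans plus the trailing run.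
import Mathlib
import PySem

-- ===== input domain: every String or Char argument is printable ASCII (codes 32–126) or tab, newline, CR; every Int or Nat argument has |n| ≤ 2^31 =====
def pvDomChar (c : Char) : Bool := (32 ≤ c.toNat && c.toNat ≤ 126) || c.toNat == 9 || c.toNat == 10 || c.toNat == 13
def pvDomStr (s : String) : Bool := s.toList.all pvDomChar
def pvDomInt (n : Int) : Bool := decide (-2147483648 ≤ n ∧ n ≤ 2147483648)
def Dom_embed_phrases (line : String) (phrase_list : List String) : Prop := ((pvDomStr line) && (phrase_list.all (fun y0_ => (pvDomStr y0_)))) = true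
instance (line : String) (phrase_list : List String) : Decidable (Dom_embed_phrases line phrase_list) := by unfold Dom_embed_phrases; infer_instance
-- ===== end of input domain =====

-- B replaces A's single interleaved scan-and-emit while-loop by two staged
-- passes: pass 1 builds a span table (start, end, joined) of the phrase match
-- locations, pass 2 assembles the output from token runs between the spans
-- (objective: alternative decomposition, same cost).

-- ===== PORT A =====
-- A's while-loop over (cur_token, cur_phrase); the 'cur_phrase == phrase_count'
-- guard is ported as 'phrases[cp]? = none' (same test on every reachable state,
-- cp only ever counts up to phrases.length; this merely totalises the lookup).
def embed_phrases_aLoop (tokens : List String) (phrases : List String) (ct cp : Nat) : List String :=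
  if h : ct < tokens.length then
    match hp : phrases[cp]? with
    | none =>
      PySem.List.slice tokens (some (ct : Int)) none
    | some p =>
      let phrase := PySem.Str.split₀ p
      if PySem.List.slice tokens (some (ct : Int)) (some ((ct : Int) + (phrase.length : Int))) = phrase then
        PySem.Str.join "_" phrase :: embed_phrases_aLoop tokens phrases (ct + phrase.length) (cp + 1)
      else
        tokens[ct] :: embed_phrases_aLoop tokens phrases (ct + 1) cp
  else []
termination_by (tokens.length - ct) + (phrases.length - cp)
decreasing_by
  · have : cp < phrases.length := (List.getElem?_eq_some_iff.mp hp).1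
    omega
  · omega

def embed_phrases (line : String) (phrase_list : List String) : String :=
  if line = "" ∨ phrase_list = [] then line
  else
    PySem.Str.join " " (embed_phrases_aLoop (PySem.Str.split₀ line) phrase_list 0 0)

-- ===== PORT B =====
-- Source B's 'next((i for i in range(cur, n) if tokens[i:i+len(ph)] == ph), None)':
-- first index i ≥ cur (i < n) whose slice equals the phrase, none if exhausted.
def embed_phrases_bFind (tokens phrase : List String) (i : Nat) : Option Nat :=
  if h : i < tokens.length then
    if PySem.List.slice tokens (some (i : Int)) (some ((i : Int) + (phrase.length : Int))) = phrase then
      some i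
    else embed_phrases_bFind tokens phrase (i + 1)
  else none
termination_by tokens.length - i

-- pass 1 of Source B: the span table (start, end, '_'.join(phrase)); a phrase with
-- no match breaks the loop.
def embed_phrases_bSpans (tokens : List String) (phrases : List String) (cur : Nat) : List (Nat × Nat × String) :=
  match phrases with
  | [] => []
  | p :: rest =>
    let ph := PySem.Str.split₀ p
    match embed_phrases_bFind tokens ph cur with
    | none => []
    | some s => (s, s + ph.length, PySem.Str.join "_" ph) :: embed_phrases_bSpans tokens rest (s + ph.length)

-- pass 2 of Source B: stitch token runs between spans, then the trailing run.
def embed_phrases_bAssemble (tokens : List String) (spans : List (Nat × Nat × String)) (prev : Nat) : List String :=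
  match spans with
  | [] => PySem.List.slice tokens (some (prev : Int)) none
  | (s, e, j) :: rest =>
    PySem.List.slice tokens (some (prev : Int)) (some (s : Int)) ++ j :: embed_phrases_bAssemble tokens rest e

def embed_phrases_alt (line : String) (phrase_list : List String) : String :=
  if line = "" ∨ phrase_list = [] then line
  else
    let tokens := PySem.Str.split₀ line
    PySem.Str.join " " (embed_phrases_bAssemble tokens (embed_phrases_bSpans tokens phrase_list 0) 0)

-- ===== PRECONDITION & SPEC =====
def Spec_embed_phrases (line : String) (phrase_list : List String) (out : String) : Prop := out = embed_phrases_alt line phrase_list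
instance (line : String) (phrase_list : List String) (out : String) : Decidable (Spec_embed_phrases line phrase_list out) := by unfold Spec_embed_phrases; infer_instance

-- ===== CLAIM (what is proved, stated in full; the proofs are below) =====
def Claim_equal_embed_phrases : Prop := ∀ (line : String) (phrase_list : List String), Dom_embed_phrases line phrase_list → Spec_embed_phrases line phrase_list (embed_phrases line phrase_list)

-- ===== LEMMAS AND PROOFS =====

theorem bFind_of_ge (tokens phrase : List String) (i : Nat) (h : ¬ i < tokens.length) :
    embed_phrases_bFind tokens phrase i = none := by
  rw [embed_phrases_bFind]; simp [h]

theorem bFind_ge (tokens phrase : List String) (i s : Nat)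
    (h : embed_phrases_bFind tokens phrase i = some s) : i ≤ s := by
  rw [embed_phrases_bFind] at h
  by_cases hl : i < tokens.length
  · simp only [hl, dite_true] at h
    split_ifs at h with hm
    · injection h with h'; omega
    · have := bFind_ge tokens phrase (i + 1) s h; omega
  · simp [hl] at h
termination_by tokens.length - i
decreasing_by omega

theorem slice_cons_to (tokens : List String) (a s : Nat) (ha : a < tokens.length) (hs : a < s) :
    PySem.List.slice tokens (some (a : Int)) (some (s : Int)) =
      tokens[a] :: PySem.List.slice tokens (some ((a + 1 : Nat) : Int)) (some (s : Int)) := by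
  rw [PySem.List.slice_natCast, PySem.List.slice_natCast,
      List.drop_eq_getElem_cons ha]
  have : s - a = (s - (a + 1)) + 1 := by omega
  rw [this, List.take_succ_cons]

theorem slice_cons_from (tokens : List String) (a : Nat) (ha : a < tokens.length) :
    PySem.List.slice tokens (some (a : Int)) none =
      tokens[a] :: PySem.List.slice tokens (some ((a + 1 : Nat) : Int)) none := by
  rw [PySem.List.slice_from_natCast, PySem.List.slice_from_natCast,
      List.drop_eq_getElem_cons ha]

theorem assemble_step (tokens : List String) (spans : List (Nat × Nat × String)) (ct : Nat)
    (h : ct < tokens.length)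
    (hs : ∀ s e j rest, spans = (s, e, j) :: rest → ct < s) :
    embed_phrases_bAssemble tokens spans ct =
      tokens[ct] :: embed_phrases_bAssemble tokens spans (ct + 1) := by
  cases spans with
  | nil => simp [embed_phrases_bAssemble, slice_cons_from tokens ct h]
  | cons hd rest =>
    obtain ⟨s, e, j⟩ := hd
    have hlt : ct < s := hs s e j rest rfl
    simp only [embed_phrases_bAssemble]
    rw [slice_cons_to tokens ct s h hlt]
    simp

theorem slice_self_nil (tokens : List String) (a : Nat) :
    PySem.List.slice tokens (some (a : Int)) (some (a : Int)) = [] := by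
  rw [PySem.List.slice_natCast]; simp

theorem loop_eq (tokens phrases : List String) (ct cp : Nat) :
    embed_phrases_aLoop tokens phrases ct cp =
      embed_phrases_bAssemble tokens (embed_phrases_bSpans tokens (phrases.drop cp) ct) ct := by
  rw [embed_phrases_aLoop]
  by_cases h : ct < tokens.length
  · simp only [h, dite_true]
    cases hp : phrases[cp]? with
    | none =>
      have hcp : phrases.length ≤ cp := List.getElem?_eq_none_iff.mp hp
      rw [List.drop_eq_nil_of_le hcp]
      simp [embed_phrases_bSpans, embed_phrases_bAssemble]
    | some p =>
      have hcp : cp < phrases.length := (List.getElem?_eq_some_iff.mp hp).1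
      have hdrop : phrases.drop cp = p :: phrases.drop (cp + 1) := by
        rw [List.drop_eq_getElem_cons hcp, (List.getElem?_eq_some_iff.mp hp).2]
      rw [hdrop]
      by_cases hm : PySem.List.slice tokens (some (ct : Int)) (some ((ct : Int) + ((PySem.Str.split₀ p).length : Int))) = PySem.Str.split₀ p
      · simp only [hm, if_true]
        have hfind : embed_phrases_bFind tokens (PySem.Str.split₀ p) ct = some ct := by
          rw [embed_phrases_bFind]; simp [h, hm]
        simp only [embed_phrases_bSpans, hfind]
        simp only [embed_phrases_bAssemble, slice_self_nil, List.nil_append]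
        rw [loop_eq tokens phrases (ct + (PySem.Str.split₀ p).length) (cp + 1)]
      · simp only [hm, if_false]
        have hfind : embed_phrases_bFind tokens (PySem.Str.split₀ p) ct =
            embed_phrases_bFind tokens (PySem.Str.split₀ p) (ct + 1) := by
          conv_lhs => rw [embed_phrases_bFind]
          simp [h, hm]
        have hspans : embed_phrases_bSpans tokens (p :: phrases.drop (cp + 1)) ct =
            embed_phrases_bSpans tokens (p :: phrases.drop (cp + 1)) (ct + 1) := by
          simp only [embed_phrases_bSpans, hfind]
        rw [hspans]
        rw [assemble_step tokens _ ct h ?_]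
        · rw [loop_eq tokens phrases (ct + 1) cp, hdrop]
        · intro s e j rest hsp
          simp only [embed_phrases_bSpans] at hsp
          cases hf : embed_phrases_bFind tokens (PySem.Str.split₀ p) (ct + 1) with
          | none => rw [hf] at hsp; exact absurd hsp (by simp)
          | some s' =>
            rw [hf] at hsp
            have := bFind_ge tokens (PySem.Str.split₀ p) (ct + 1) s' hf
            injection hsp with h1 _
            injection h1 with ha _
            omega
  · simp only [h, dite_false]
    cases hd : phrases.drop cp with
    | nil =>
      simp [embed_phrases_bSpans, embed_phrases_bAssemble,
        PySem.List.slice_from_natCast, List.drop_eq_nil_of_le (by omega : tokens.length ≤ ct)]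
    | cons p rest =>
      simp [embed_phrases_bSpans, bFind_of_ge tokens _ ct h, embed_phrases_bAssemble,
        PySem.List.slice_from_natCast, List.drop_eq_nil_of_le (by omega : tokens.length ≤ ct)]
termination_by (tokens.length - ct) + (phrases.length - cp)
decreasing_by
  · omega
  · omega

-- ===== VERDICT (by name: the statement is the Claim_ definition above) =====
theorem embed_phrases_spec : Claim_equal_embed_phrases := by
  intro line phrase_list _
  unfold Spec_embed_phrases embed_phrases embed_phrases_alt
  by_cases hg : line = "" ∨ phrase_list = []
  · simp [hg]
  · simp only [hg, if_false]
    rw [loop_eq, List.drop_zero]
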